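-- pv_equiv track=rewrite | github.com/HoonDongKang/Algorithm | 백준/Silver/3986. 좋은 단어/좋은 단어.py | solve
-- ===== SOURCE A (Python) =====
-- def solve(words: list[str]) -> int:
--     stack = []
--     result = 0
--
--     for word in words:
--         stack = []
--         for char in word:
--             if stack and stack[-1] == char:
--                 stack.pop()
--             else:
--                 stack.append(char)
--
--         if not stack:
--             result +=1
--
--     return result
-- ===== SOURCE B (Python) =====
-- def solve(words: list[str]) -> int:
--     count = 0
--     for word in words:
--         s = word
--         changed = True
--         while changed:
--             changed = False
--             for i in range(len(s) - 1):
--                 if s[i] == s[i + 1]: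
--                     s = s[:i] + s[i + 2:]
--                     changed = True
--                     break
--         count += (s == "")
--     return count
-- ===== Notes on version B (the rewrite author's own statement) =====
-- stated objective: alternative
-- what changed: Replaces the per-word stack simulation by a fixed-point rewriting: repeatedly delete the first adjacent equal pair until none remains, then count the word if the residue is empty (adjacent-pair cancellation is confluent, so emptiness agrees with the stack method).
import Mathlib
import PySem

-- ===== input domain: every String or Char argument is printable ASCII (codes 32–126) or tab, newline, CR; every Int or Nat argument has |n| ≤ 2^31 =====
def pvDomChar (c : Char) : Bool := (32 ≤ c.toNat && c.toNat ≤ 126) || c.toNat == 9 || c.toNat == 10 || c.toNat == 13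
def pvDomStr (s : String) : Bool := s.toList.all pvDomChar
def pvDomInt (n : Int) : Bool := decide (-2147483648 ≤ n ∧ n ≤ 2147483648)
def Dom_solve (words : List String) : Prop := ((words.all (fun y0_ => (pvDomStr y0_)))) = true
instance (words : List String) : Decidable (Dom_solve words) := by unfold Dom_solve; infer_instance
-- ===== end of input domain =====

-- B replaces A's per-word stack scan by fixed-point deletion of adjacent equal pairs
-- (a genuinely different rewriting algorithm; not faster).

-- ===== PORT A =====
-- Python list 'stack' with append/pop at the end: top of the stack is the LAST element.
def stepA (st : List Char) (c : Char) : List Char :=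
  if st.getLast? = some c then st.dropLast else st ++ [c]

def solve (words : List String) : Int :=
  words.foldl (fun result word =>
    let stack := word.toList.foldl stepA []
    if stack = [] then result + 1 else result) 0

-- ===== PORT B =====
-- one pass of Source B's inner for-loop: delete the FIRST adjacent equal pair, if any
def rp : List Char → Option (List Char)
  | [] => none
  | [_] => none
  | a :: b :: t => if a = b then some t else (rp (b :: t)).map (a :: ·)

-- needed by reduceFix's termination proof
theorem rp_some_length : ∀ (s t : List Char), rp s = some t → t.length < s.length
  | [], _, h => by simp [rp] at h
  | [_], _, h => by simp [rp] at h
  | a :: b :: w, t, h => by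
    rw [rp] at h
    split_ifs at h with hab
    · cases h; simp
    · cases hm : rp (b :: w) with
      | none => rw [hm] at h; simp at h
      | some t' =>
        rw [hm] at h
        cases h
        have := rp_some_length (b :: w) t' hm
        simp at this ⊢
        omega

-- Source B's while-changed loop: repeat until no adjacent equal pair remains
def reduceFix (s : List Char) : List Char :=
  match h : rp s with
  | none => s
  | some t => reduceFix t
termination_by s.length
decreasing_by exact rp_some_length s t h

def solve_alt (words : List String) : Int :=
  words.foldl (fun count word =>
    if reduceFix word.toList = [] then count + 1 else count) 0

-- ===== PRECONDITION & SPEC =====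
def Spec_solve (words : List String) (out : Int) : Prop := out = solve_alt words
instance (words : List String) (out : Int) : Decidable (Spec_solve words out) := by unfold Spec_solve; infer_instance

-- ===== CLAIM (what is proved, stated in full; the proofs are below) =====
def Claim_equal_solve : Prop := ∀ (words : List String), Dom_solve words → Spec_solve words (solve words)

-- ===== LEMMAS AND PROOFS =====

-- A's stack never holds two adjacent equal characters.
lemma isChain_stepA (st : List Char) (c : Char) (h : List.IsChain (· ≠ ·) st) :
    List.IsChain (· ≠ ·) (stepA st c) := by
  unfold stepA
  split_ifs with hl
  · exact h.dropLast
  · rw [List.isChain_append]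
    refine ⟨h, List.isChain_singleton _, ?_⟩
    intro x hx y hy
    simp at hy
    subst hy
    intro hxc
    exact hl (by rw [hx, hxc])

lemma isChain_foldl (l : List Char) (st : List Char) (h : List.IsChain (· ≠ ·) st) :
    List.IsChain (· ≠ ·) (List.foldl stepA st l) := by
  induction l generalizing st with
  | nil => exact h
  | cons c l ih => exact ih _ (isChain_stepA st c h)

-- Processing a pair of equal characters leaves an adjacent-distinct stack unchanged.
lemma stepA_pair (st : List Char) (c : Char) (h : List.IsChain (· ≠ ·) st) :
    stepA (stepA st c) c = st := by
  by_cases hl : st.getLast? = some c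
  · rcases List.eq_nil_or_concat st with rfl | ⟨ys, y, rfl⟩
    · simp at hl
    · simp only [List.concat_eq_append] at h hl ⊢
      have hyc : y = c := by simpa using hl
      subst hyc
      have hc : ys.getLast? ≠ some y := by
        intro hd
        rw [List.isChain_append] at h
        exact h.2.2 y hd y (by simp) rfl
      have h1 : stepA (ys ++ [y]) y = ys := by
        rw [stepA, if_pos hl]
        simp
      rw [h1, stepA, if_neg hc]
  · have h1 : stepA st c = st ++ [c] := by rw [stepA, if_neg hl]
    rw [h1, stepA, if_pos (by simp), List.dropLast_concat]

lemma foldl_splice (u v : List Char) (c : Char) (st : List Char)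
    (h : List.IsChain (· ≠ ·) st) :
    List.foldl stepA st (u ++ c :: c :: v) = List.foldl stepA st (u ++ v) := by
  rw [List.foldl_append, List.foldl_append]
  have hS : List.IsChain (· ≠ ·) (List.foldl stepA st u) := isChain_foldl u st h
  show List.foldl stepA (stepA (stepA _ c) c) v = _
  rw [stepA_pair _ c hS]

-- rp finds exactly the first adjacent equal pair.
theorem rp_some_spec : ∀ (s t : List Char), rp s = some t →
    ∃ u c v, s = u ++ c :: c :: v ∧ t = u ++ v
  | [], _, h => by simp [rp] at h
  | [_], _, h => by simp [rp] at h
  | a :: b :: w, t, h => by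
    rw [rp] at h
    split_ifs at h with hab
    · cases h; exact ⟨[], a, w, by simp [hab], by simp⟩
    · cases hm : rp (b :: w) with
      | none => rw [hm] at h; simp at h
      | some t' =>
        rw [hm] at h
        cases h
        obtain ⟨u, c, v, h1, h2⟩ := rp_some_spec (b :: w) t' hm
        exact ⟨a :: u, c, v, by simp [h1], by simp [h2]⟩

theorem rp_none_isChain : ∀ (s : List Char), rp s = none → List.IsChain (· ≠ ·) s
  | [], _ => List.IsChain.nil
  | [_], _ => List.isChain_singleton _
  | a :: b :: w, h => by
    rw [rp] at h
    split_ifs at h with hab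
    · cases hm : rp (b :: w) with
      | none =>
        rw [List.isChain_cons]
        exact ⟨by intro y hy; simp at hy; subst hy; exact hab, rp_none_isChain (b :: w) hm⟩
      | some t' => rw [hm] at h; simp at h

-- On an adjacent-distinct word the stack simulation just copies the word.
lemma foldl_isChain (s st : List Char) (h : List.IsChain (· ≠ ·) (st ++ s)) :
    List.foldl stepA st s = st ++ s := by
  induction s generalizing st with
  | nil => simp
  | cons c s ih =>
    have hstep : stepA st c = st ++ [c] := by
      rw [stepA, if_neg]
      intro hl
      rw [List.isChain_append] at h
      exact h.2.2 c hl c (by simp) rfl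
    rw [List.foldl_cons, hstep, ih (st ++ [c]) (by simpa using h)]
    simp

-- Each rewriting step of B preserves the final stack of A; A's stack IS B's normal form.
lemma foldl_eq_reduceFix (s : List Char) :
    List.foldl stepA [] s = reduceFix s := by
  induction hn : s.length using Nat.strong_induction_on generalizing s with
  | _ n ih =>
    cases hm : rp s with
    | none =>
      rw [reduceFix, hm]
      simpa using foldl_isChain s [] (by simpa using rp_none_isChain s hm)
    | some t =>
      rw [reduceFix, hm]
      obtain ⟨u, c, v, h1, h2⟩ := rp_some_spec s t hm
      have hlt := rp_some_length s t hm
      calc List.foldl stepA [] s = List.foldl stepA [] t := by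
            rw [h1, h2]; exact foldl_splice u v c [] List.IsChain.nil
        _ = reduceFix t := ih t.length (hn ▸ hlt) t rfl

-- ===== VERDICT (by name: the statement is the Claim_ definition above) =====
theorem solve_spec : Claim_equal_solve := by
  intro words _
  show solve words = solve_alt words
  unfold solve solve_alt
  congr 1
  funext result word
  simp only [foldl_eq_reduceFix]
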